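-- pv_equiv track=rewrite | github.com/drussellmrichie/TATools | COGSTools/cohortModelPure.py | cohortModel
-- ===== SOURCE A (Python) =====
-- def cohortModel(word, EnglishWords):
--     soFar = ''                                # when we start listening to a word, we of course haven't heard anything yet, so we'll represent that as an empty string
--     activated = list(EnglishWords)            # we'll maintain a list of the activated words...we'll start by assuming all the words we know are possible and thus activated
--     timeCourse = [ list(activated) ]		  # we'll make a list -- timeCourse -- of the activated words after each letter
--     for letter in word:                       # then start listening to the word letter by letter
--         soFar = soFar + letter                # add the newly heard letter to the portion of the word heard so far
--         for word in list(activated):          # now look through the candidate words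
--             if not word.startswith(soFar):    # if the word seen so far is NOT consistent with a word we know
--                 activated.remove(word)        # remove the word from the candidates
--         timeCourse.append( list(activated) )  # add currently activated words to timeCourse
--     return timeCourse
-- ===== SOURCE B (Python) =====
-- def cohortModel(word, EnglishWords):
--     # One pass computes each word's common-prefix length with the input;
--     # each time step is then a cheap threshold filter on the shrinking cohort
--     # (no per-prefix string comparisons, no O(n) list.remove calls).
--     def cpl(w):
--         k = 0
--         for a, b in zip(w, word):
--             if a != b:
--                 break
--             k += 1
--         return k
--     cur = [(w, cpl(w)) for w in EnglishWords]
--     res = [list(EnglishWords)]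
--     for i in range(1, len(word) + 1):
--         cur = [p for p in cur if p[1] >= i]
--         res.append([w for w, _ in cur])
--     return res
-- ===== Notes on version B (the rewrite author's own statement) =====
-- stated objective: faster
-- what changed: Instead of repeatedly rescanning and pruning the activated list for every prefix, B computes each word's common-prefix length with the input once, then each time step is a simple threshold filter.
import Mathlib
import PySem

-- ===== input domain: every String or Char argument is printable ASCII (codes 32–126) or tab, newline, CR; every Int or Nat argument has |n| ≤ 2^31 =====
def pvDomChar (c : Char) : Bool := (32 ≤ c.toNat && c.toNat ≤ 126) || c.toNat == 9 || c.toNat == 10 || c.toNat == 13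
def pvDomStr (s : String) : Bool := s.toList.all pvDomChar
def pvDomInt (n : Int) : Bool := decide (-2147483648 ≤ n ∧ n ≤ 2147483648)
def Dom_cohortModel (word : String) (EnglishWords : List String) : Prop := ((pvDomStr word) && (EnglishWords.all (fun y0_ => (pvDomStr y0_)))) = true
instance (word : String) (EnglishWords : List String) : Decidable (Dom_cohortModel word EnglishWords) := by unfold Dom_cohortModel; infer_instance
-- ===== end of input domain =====

-- B replaces A's repeated prune-the-cohort rescans by one common-prefix-length pass; the equivalence is about the return value (A mutates nothing observable).

-- ===== PORT A =====
-- state: (soFar as List Char, activated, timeCourse); inner loop iterates the snapshot of activated,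
-- removing from the accumulator ('.getD acc' only totalizes remove?; the element is always present).
def cohortModel (word : String) (EnglishWords : List String) : List (List String) :=
  let activated := EnglishWords
  let fin := word.toList.foldl
    (fun (st : List Char × List String × List (List String)) letter =>
      let soFar := st.1 ++ [letter]
      let activated := st.2.1.foldl
        (fun acc w =>
          if ¬ PySem.Chars.startswith w.toList soFar then (PySem.List.remove? acc w).getD acc
          else acc) st.2.1
      (soFar, activated, st.2.2 ++ [activated]))
    ([], activated, [activated])
  fin.2.2

-- ===== PORT B =====
-- cpl(w): the zip loop of Source B counting matching leading characters
def pvCpl : List Char → List Char → Nat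
  | a :: as, b :: bs => if a == b then pvCpl as bs + 1 else 0
  | _, _ => 0

def cohortModel_alt (word : String) (EnglishWords : List String) : List (List String) :=
  let cur := EnglishWords.map (fun w => (w, pvCpl w.toList word.toList))
  let fin := (List.range' 1 word.toList.length).foldl
    (fun (st : List (String × Nat) × List (List String)) i =>
      let cur := st.1.filter (fun p => i ≤ p.2)
      (cur, st.2 ++ [cur.map Prod.fst]))
    (cur, [EnglishWords])
  fin.2

-- ===== PRECONDITION & SPEC =====
def Spec_cohortModel (word : String) (EnglishWords : List String) (out : List (List String)) : Prop := out = cohortModel_alt word EnglishWords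
instance (word : String) (EnglishWords : List String) (out : List (List String)) : Decidable (Spec_cohortModel word EnglishWords out) := by unfold Spec_cohortModel; infer_instance

-- ===== CLAIM (what is proved, stated in full; the proofs are below) =====
def Claim_equal_cohortModel : Prop := ∀ (word : String) (EnglishWords : List String), Dom_cohortModel word EnglishWords → Spec_cohortModel word EnglishWords (cohortModel word EnglishWords)

-- ===== LEMMAS AND PROOFS =====

-- the inner-loop step keeps a surviving head untouched
theorem pv_foldl_remove_keep (q : String → Bool) (x : String) (hx : q x = true) :
    ∀ (xs a : List String),
      xs.foldl (fun acc w => if ¬ q w then (PySem.List.remove? acc w).getD acc else acc) (x :: a)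
      = x :: xs.foldl (fun acc w => if ¬ q w then (PySem.List.remove? acc w).getD acc else acc) a := by
  intro xs
  induction xs with
  | nil => intro a; rfl
  | cons w xs ih =>
    intro a
    rw [List.foldl_cons, List.foldl_cons]
    by_cases hw : q w = true
    · rw [if_neg (by simp [hw]), if_neg (by simp [hw])]
      exact ih a
    · have hne : x ≠ w := fun h => hw (h ▸ hx)
      rw [if_pos (by simp [hw]), if_pos (by simp [hw]), PySem.List.remove?_cons_of_ne a hne]
      cases h : PySem.List.remove? a w with
      | none => simpa using ih a
      | some r => simpa using ih r

-- the inner loop over a snapshot of the accumulator is exactly filter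
theorem pv_foldl_remove_filter (q : String → Bool) :
    ∀ (xs : List String),
      xs.foldl (fun acc w => if ¬ q w then (PySem.List.remove? acc w).getD acc else acc) xs
      = xs.filter q := by
  intro xs
  induction xs with
  | nil => rfl
  | cons x xs ih =>
    rw [List.foldl_cons]
    by_cases hx : q x = true
    · rw [if_neg (by simp [hx]), pv_foldl_remove_keep q x hx xs xs, ih,
        List.filter_cons_of_pos hx]
    · rw [if_pos (by simp [hx]), PySem.List.remove?_cons_self, Option.getD_some, ih,
        List.filter_cons_of_neg (by simp [hx])]

theorem pv_sw_mono (s t : List Char) (w : String) (h : s <+: t)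
    (hw : PySem.Chars.startswith w.toList t = true) :
    PySem.Chars.startswith w.toList s = true := by
  rw [PySem.Chars.startswith_iff] at *
  exact h.trans hw

-- characterisation of A's outer fold
theorem pv_outer (E : List String) :
    ∀ (cs s : List Char) (T : List (List String)),
      cs.foldl
        (fun (st : List Char × List String × List (List String)) letter =>
          let soFar := st.1 ++ [letter]
          let activated := st.2.1.foldl
            (fun acc w =>
              if ¬ PySem.Chars.startswith w.toList soFar then (PySem.List.remove? acc w).getD acc
              else acc) st.2.1
          (soFar, activated, st.2.2 ++ [activated]))
        (s, E.filter (fun w => PySem.Chars.startswith w.toList s), T)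
      = (s ++ cs, E.filter (fun w => PySem.Chars.startswith w.toList (s ++ cs)),
         T ++ (List.range cs.length).map
              (fun j => E.filter (fun w => PySem.Chars.startswith w.toList (s ++ cs.take (j+1))))) := by
  intro cs
  induction cs with
  | nil => intro s T; simp
  | cons c cs ih =>
    intro s T
    rw [List.foldl_cons]
    have hstep :
        (E.filter (fun w => PySem.Chars.startswith w.toList s)).foldl
          (fun acc w =>
            if ¬ PySem.Chars.startswith w.toList (s ++ [c]) then (PySem.List.remove? acc w).getD acc
            else acc) (E.filter (fun w => PySem.Chars.startswith w.toList s))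
        = E.filter (fun w => PySem.Chars.startswith w.toList (s ++ [c])) := by
      rw [pv_foldl_remove_filter, List.filter_filter]
      apply List.filter_congr
      intro w _
      by_cases h : PySem.Chars.startswith w.toList (s ++ [c]) = true
      · simp [h, pv_sw_mono s (s ++ [c]) w ⟨[c], rfl⟩ h]
      · simp [Bool.eq_false_iff.mpr h]
    simp only [hstep]
    rw [ih (s ++ [c]) (T ++ [E.filter (fun w => PySem.Chars.startswith w.toList (s ++ [c]))])]
    simp only [Prod.mk.injEq]
    refine ⟨by simp, by simp [List.append_assoc], ?_⟩
    rw [List.append_assoc, List.singleton_append, List.length_cons, List.range_succ_eq_map,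
      List.map_cons, List.map_map]
    congr 1
    congr 1
    apply List.map_congr_left
    intro j _
    simp [Function.comp, List.append_assoc]

-- prefix test against word[:i] is a common-prefix-length threshold
theorem pv_cpl_prefix : ∀ (i : Nat) (u w : List Char), i ≤ u.length →
    (u.take i <+: w ↔ i ≤ pvCpl w u) := by
  intro i
  induction i with
  | zero => intro u w _; simp
  | succ i ih =>
    intro u w hu
    cases u with
    | nil => simp at hu
    | cons a u =>
      have hu' : i ≤ u.length := by simpa using hu
      cases w with
      | nil =>
        simp only [List.take_succ_cons, pvCpl]
        constructor
        · intro h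
          have := h.length_le
          simp at this
        · intro h
          omega
      | cons b w =>
        simp only [List.take_succ_cons, List.cons_prefix_cons, pvCpl]
        by_cases hab : b = a
        · subst hab
          rw [if_pos (by simp)]
          constructor
          · rintro ⟨-, h⟩
            have := (ih u w hu').mp h
            omega
          · intro h
            exact ⟨rfl, (ih u w hu').mpr (by omega)⟩
        · rw [if_neg (by simp [hab])]
          constructor
          · rintro ⟨h1, -⟩
            exact absurd h1.symm hab
          · intro h
            exact absurd h (by omega)

theorem pv_sw_take_eq (i : Nat) (u : List Char) (w : String) (hu : i ≤ u.length) :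
    PySem.Chars.startswith w.toList (u.take i) = decide (i ≤ pvCpl w.toList u) := by
  by_cases h : i ≤ pvCpl w.toList u
  · simp [h, PySem.Chars.startswith_iff, (pv_cpl_prefix i u w.toList hu).mpr h]
  · have hnp := (pv_cpl_prefix i u w.toList hu).not.mpr h
    simp only [h, decide_false]
    rw [← Bool.not_eq_true, PySem.Chars.startswith_iff]
    exact hnp

-- B's filtered pair list projects to a plain filter
theorem pv_map_filter (i : Nat) (cpl : String → Nat) :
    ∀ (E : List String),
      (((E.map (fun w => (w, cpl w))).filter (fun p => i ≤ p.2)).map Prod.fst)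
      = E.filter (fun w => i ≤ cpl w) := by
  intro E
  induction E with
  | nil => rfl
  | cons x E ih =>
    simp only [List.map_cons, List.filter_cons]
    by_cases h : i ≤ cpl x
    · simp [h, ih]
    · simp [h, ih]

-- filtering with a larger threshold refines the previous filter
theorem pv_filter_step (cpl : String → Nat) (E : List String) (s : Nat) :
    ((E.map (fun w => (w, cpl w))).filter (fun p => s ≤ p.2)).filter (fun p => s + 1 ≤ p.2)
    = (E.map (fun w => (w, cpl w))).filter (fun p => s + 1 ≤ p.2) := by
  rw [List.filter_filter]
  apply List.filter_congr
  intro p _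
  by_cases h : s + 1 ≤ p.2
  · simp [h, Nat.le_of_succ_le h]
  · simp [h]

-- characterisation of B's fold
theorem pv_B_fold (cpl : String → Nat) (E : List String) :
    ∀ (k s : Nat) (T : List (List String)),
      (List.range' (s + 1) k).foldl
        (fun (st : List (String × Nat) × List (List String)) i =>
          let cur := st.1.filter (fun p => i ≤ p.2)
          (cur, st.2 ++ [cur.map Prod.fst]))
        ((E.map (fun w => (w, cpl w))).filter (fun p => s ≤ p.2), T)
      = ((E.map (fun w => (w, cpl w))).filter (fun p => s + k ≤ p.2),
         T ++ (List.range k).map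
              (fun j => ((E.map (fun w => (w, cpl w))).filter (fun p => s + j + 1 ≤ p.2)).map Prod.fst)) := by
  intro k
  induction k with
  | zero => intro s T; simp
  | succ k ih =>
    intro s T
    rw [List.range'_succ, List.foldl_cons]
    simp only [pv_filter_step cpl E s]
    have := ih (s + 1) (T ++ [((E.map (fun w => (w, cpl w))).filter (fun p => s + 1 ≤ p.2)).map Prod.fst])
    rw [this]
    simp only [Prod.mk.injEq]
    constructor
    · apply List.filter_congr
      intro p _
      simp only [decide_eq_decide]
      omega
    · rw [List.append_assoc, List.singleton_append, List.range_succ_eq_map,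
        List.map_cons, List.map_map]
      congr 1
      refine List.cons_eq_cons.mpr ⟨rfl, ?_⟩
      apply List.map_congr_left
      intro j hj
      simp only [Function.comp_apply]
      congr 1
      apply List.filter_congr
      intro p _
      simp only [decide_eq_decide]
      omega

-- ===== VERDICT (by name: the statement is the Claim_ definition above) =====
theorem cohortModel_spec : Claim_equal_cohortModel := by
  intro word E _
  unfold Spec_cohortModel cohortModel cohortModel_alt
  have h0 : E.filter (fun w => PySem.Chars.startswith w.toList ([] : List Char)) = E := by
    rw [List.filter_eq_self]
    intro w _
    simp [PySem.Chars.startswith_iff]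
  have hout := pv_outer E word.toList [] [E]
  rw [h0] at hout
  have hB0 : E.map (fun w => (w, pvCpl w.toList word.toList))
      = (E.map (fun w => (w, pvCpl w.toList word.toList))).filter (fun p => 0 ≤ p.2) := by
    rw [eq_comm, List.filter_eq_self]
    intro p _
    simp
  have hBfold := pv_B_fold (fun w => pvCpl w.toList word.toList) E word.toList.length 0 [E]
  simp only [Nat.zero_add] at hBfold
  rw [← hB0] at hBfold
  simp only [hout, hBfold, List.nil_append]
  congr 1
  apply List.map_congr_left
  intro j hj
  rw [List.mem_range] at hj
  rw [pv_map_filter (j+1)]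
  apply List.filter_congr
  intro w _
  exact pv_sw_take_eq (j+1) word.toList w (by omega)
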